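-- pv_equiv track=rewrite | github.com/Johnstedt/lightning-strategy-game-simulation | src/price_strategies.py | retrieve_optimal_price
-- ===== SOURCE A (Python) =====
-- def retrieve_optimal_price(dim):
-- 	base_max = 0
-- 	prop_max = 0
-- 	max_profit = 0
-- 	for i, prop in enumerate(dim):
-- 		for j, base in enumerate(prop):
-- 			if base > max_profit:
-- 				max_profit = base
-- 				base_max = j
-- 				prop_max = i
--
-- 	return base_max, prop_max
-- ===== SOURCE B (Python) =====
-- def retrieve_optimal_price(dim):
--     summaries = []
--     for row in dim:
--         if row:
--             m = max(row)
--             summaries.append((m, row.index(m)))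
--         else:
--             summaries.append(None)
--     best = 0
--     res = (0, 0)
--     for i, s in enumerate(summaries):
--         if s is not None and s[0] > best:
--             best = s[0]
--             res = (s[1], i)
--     return res
-- ===== Notes on version B (the rewrite author's own statement) =====
-- stated objective: alternative
-- what changed: Replaces A's single nested scan with one shared running (col,row,max) state by two passes: a first pass building per-row (max value, first index) summaries via max()/index(), then a linear scan of the summaries with a running best.
import Mathlib
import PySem

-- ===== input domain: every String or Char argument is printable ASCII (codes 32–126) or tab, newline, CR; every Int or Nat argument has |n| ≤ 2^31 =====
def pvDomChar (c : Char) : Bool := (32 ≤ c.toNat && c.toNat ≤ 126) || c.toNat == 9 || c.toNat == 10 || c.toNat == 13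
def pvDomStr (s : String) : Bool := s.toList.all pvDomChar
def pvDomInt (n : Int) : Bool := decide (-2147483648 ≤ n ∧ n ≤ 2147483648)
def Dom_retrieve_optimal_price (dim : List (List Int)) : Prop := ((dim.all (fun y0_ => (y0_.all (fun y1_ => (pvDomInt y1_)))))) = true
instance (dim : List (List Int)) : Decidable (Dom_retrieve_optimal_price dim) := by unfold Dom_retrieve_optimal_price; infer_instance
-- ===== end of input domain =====

-- B replaces A's single nested scan with one global running state by two passes:
-- per-row (max, first index) summaries, then a linear scan of the summaries (objective: simpler decomposition).

-- ===== PORT A =====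
-- inner loop: 'for j, base in enumerate(prop)' with state (base_max, prop_max, max_profit)
def innerA (i : Int) (j : Int) (row : List Int) (s : Int × Int × Int) : Int × Int × Int :=
  match row with
  | [] => s
  | base :: rest => innerA i (j + 1) rest (if base > s.2.2 then (j, i, base) else s)

-- outer loop: 'for i, prop in enumerate(dim)'
def outerA (i : Int) (rows : List (List Int)) (s : Int × Int × Int) : Int × Int × Int :=
  match rows with
  | [] => s
  | row :: rest => outerA (i + 1) rest (innerA i 0 row s)

def retrieve_optimal_price (dim : List (List Int)) : Int × Int :=
  let s := outerA 0 dim (0, 0, 0)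
  (s.1, s.2.1)

-- ===== PORT B =====
-- first pass: per-row summary (max value, first column index), None for an empty row
def rowSummary (row : List Int) : Option (Int × Int) :=
  match PySem.List.max? row (fun y => y) with
  | none => none
  | some m => some (m, ((PySem.List.index? row m).getD 0 : Nat))

-- second pass: running best over the enumerated summaries
def pass2 (ss : List (Option (Int × Int))) (i : Int) (best : Int) (res : Int × Int) : Int × Int :=
  match ss with
  | [] => res
  | none :: rest => pass2 rest (i + 1) best res
  | some (m, j) :: rest =>
      if m > best then pass2 rest (i + 1) m (j, i) else pass2 rest (i + 1) best res

def retrieve_optimal_price_alt (dim : List (List Int)) : Int × Int :=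
  pass2 (dim.map rowSummary) 0 0 (0, 0)

-- ===== PRECONDITION & SPEC =====
def Spec_retrieve_optimal_price (dim : List (List Int)) (out : Int × Int) : Prop := out = retrieve_optimal_price_alt dim
instance (dim : List (List Int)) (out : Int × Int) : Decidable (Spec_retrieve_optimal_price dim out) := by unfold Spec_retrieve_optimal_price; infer_instance

-- ===== CLAIM (what is proved, stated in full; the proofs are below) =====
def Claim_equal_retrieve_optimal_price : Prop := ∀ (dim : List (List Int)), Dom_retrieve_optimal_price dim → Spec_retrieve_optimal_price dim (retrieve_optimal_price dim)

-- ===== LEMMAS AND PROOFS =====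

lemma lmax_cons (t : List Int) : ∀ x y : Int, List.foldl max (max x y) t = max x (List.foldl max y t) := by
  induction t with
  | nil => intro x y; rfl
  | cons z t ih =>
    intro x y
    simp only [List.foldl_cons]
    rw [max_assoc, ih]

-- characterization of A's inner loop against the row summary
lemma innerA_cons (i j0 x : Int) (r : List Int) (s : Int × Int × Int) :
    innerA i j0 (x :: r) s = innerA i (j0 + 1) r (if x > s.2.2 then (j0, i, x) else s) := rfl

lemma inner_char (t : List Int) : ∀ (x i j0 b p mp : Int),
    ∃ k : Nat, PySem.List.index? (x :: t) (List.foldl max x t) = some k ∧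
      innerA i j0 (x :: t) (b, p, mp) =
        (if mp < List.foldl max x t then ((j0 + (k : Int)), i, List.foldl max x t) else (b, p, mp)) := by
  induction t with
  | nil =>
    intro x i j0 b p mp
    refine ⟨0, by rw [List.foldl_nil]; exact PySem.List.index?_cons_self x [], ?_⟩
    rw [innerA_cons]
    by_cases h : mp < x
    · simp only [List.foldl_nil, show x > (b, p, mp).2.2 ↔ True by simpa using h, if_true]
      simp [innerA]
    · simp only [List.foldl_nil, show x > (b, p, mp).2.2 ↔ False by simpa using h, if_false]
      simp [innerA]
  | cons y t ih =>
    intro x i j0 b p mp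
    have hm : List.foldl max x (y :: t) = max x (List.foldl max y t) := by
      simp only [List.foldl_cons]; exact lmax_cons t x y
    by_cases hx : List.foldl max y t ≤ x
    · -- total max is x
      have hmx : List.foldl max x (y :: t) = x := by rw [hm]; exact max_eq_left hx
      refine ⟨0, by rw [hmx]; exact PySem.List.index?_cons_self x (y :: t), ?_⟩
      rw [hmx, innerA_cons]
      by_cases h : mp < x
      · -- head updates; tail can never beat x since its max is ≤ x
        obtain ⟨k, hk, hrec⟩ := ih y i (j0 + 1) j0 i x
        simp only [show x > (b, p, mp).2.2 ↔ True by simpa using h, if_true]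
        rw [hrec, if_neg (not_lt.mpr hx)]
        simp
      · -- x ≤ mp, so nothing in the row beats mp
        obtain ⟨k, hk, hrec⟩ := ih y i (j0 + 1) b p mp
        simp only [show x > (b, p, mp).2.2 ↔ False by simpa using h, if_false]
        rw [hrec, if_neg (fun hc => h (lt_of_lt_of_le hc hx))]
    · -- total max is the tail max, strictly above x
      push Not at hx
      have hmx : List.foldl max x (y :: t) = List.foldl max y t := by
        rw [hm]; exact max_eq_right (le_of_lt hx)
      obtain ⟨k, hk, _⟩ := ih y i (j0 + 1) b p mp
      refine ⟨k + 1, ?_, ?_⟩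
      · have hne : x ≠ List.foldl max y t := ne_of_lt hx
        rw [hmx, PySem.List.index?_cons_of_ne (y :: t) hne, hk]; rfl
      · rw [hmx, innerA_cons]
        by_cases h : mp < x
        · obtain ⟨k', hk', hrec⟩ := ih y i (j0 + 1) j0 i x
          simp only [show x > (b, p, mp).2.2 ↔ True by simpa using h, if_true]
          rw [hrec, if_pos hx]
          have hk'' : k' = k := by rw [hk] at hk'; exact (Option.some_inj.mp hk').symm
          rw [if_pos (lt_trans h hx), hk'']
          refine congrArg (fun z => (z, i, List.foldl max y t)) ?_
          push_cast; ring
        · obtain ⟨k', hk', hrec⟩ := ih y i (j0 + 1) b p mp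
          simp only [show x > (b, p, mp).2.2 ↔ False by simpa using h, if_false]
          rw [hrec]
          have hk'' : k' = k := by rw [hk] at hk'; exact (Option.some_inj.mp hk').symm
          by_cases h2 : mp < List.foldl max y t
          · rw [if_pos h2, if_pos h2, hk'']
            refine congrArg (fun z => (z, i, List.foldl max y t)) ?_
            push_cast; ring
          · rw [if_neg h2, if_neg h2]

lemma main_lemma (dim : List (List Int)) : ∀ (i b p mp : Int),
    pass2 (dim.map rowSummary) i mp (b, p) =
      ((outerA i dim (b, p, mp)).1, (outerA i dim (b, p, mp)).2.1) := by
  induction dim with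
  | nil => intro i b p mp; rfl
  | cons row rest ih =>
    intro i b p mp
    cases row with
    | nil =>
      have hnone : PySem.List.max? ([] : List Int) (fun y => y) = none := rfl
      have hs : rowSummary [] = none := by simp [rowSummary, hnone]
      simp only [List.map_cons, hs, pass2, outerA, innerA]
      exact ih (i + 1) b p mp
    | cons x t =>
      obtain ⟨k, hk, hrec⟩ := inner_char t x i 0 b p mp
      have hmax : PySem.List.max? (x :: t) (fun y => y) = some (List.foldl max x t) :=
        PySem.List.max?_id_cons x t
      have hk' := hk
      simp only [PySem.List.index?_eq_idxOf?] at hk'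
      have hs : rowSummary (x :: t) = some (List.foldl max x t, (k : Int)) := by
        simp [rowSummary, hmax, hk']
      simp only [List.map_cons, hs, pass2, outerA]
      rw [hrec]
      by_cases h : mp < List.foldl max x t
      · rw [if_pos h, if_pos h]
        simp only [zero_add]
        exact ih (i + 1) (k : Int) i (List.foldl max x t)
      · rw [if_neg h, if_neg h]
        exact ih (i + 1) b p mp

-- ===== VERDICT (by name: the statement is the Claim_ definition above) =====
theorem retrieve_optimal_price_spec : Claim_equal_retrieve_optimal_price := by
  intro dim _
  unfold Spec_retrieve_optimal_price retrieve_optimal_price retrieve_optimal_price_alt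
  exact (main_lemma dim 0 0 0 0).symm
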